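-- pv_equiv track=rewrite | github.com/hotanlocrs/Project_HoTanLoc | Building an attendance module based on face recognition in OrangeHRM open-source software/CheckPim.py | sosanh
-- ===== SOURCE A (Python) =====
-- def sosanh(a,b):
--     if (len(a)>len(b)):
--         tb=0
--         while tb<len(b):
--             ta=0
--             while ta<len(a):
--                 if b[tb]==a[ta]:
--                     b.pop(tb)
--                     a.pop(ta)
--                     ta=len(a)
--                     tb=tb-1
--                 ta=ta+1
--             tb=tb+1
--         return a
--     if (len(a)<len(b)):
--         ta=0
--         while ta<len(a):
--             tb=0
--             while tb<len(b):
--                 if b[tb]==a[ta]: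
--                     b.pop(tb)
--                     a.pop(ta)
--                     tb=len(b)
--                     ta=ta-1
--                 tb=tb+1
--             ta=ta+1
--         return b
--     return []
-- ===== SOURCE B (Python) =====
-- def sosanh(a, b):
--     if len(a) == len(b):
--         return []
--     longer, shorter = (a, b) if len(a) > len(b) else (b, a)
--     need = {}
--     for x in shorter:
--         need[x] = need.get(x, 0) + 1
--     out = []
--     for x in longer:
--         if need.get(x, 0) > 0:
--             need[x] = need[x] - 1
--         else:
--             out.append(x)
--     return out
-- ===== Notes on version B (the rewrite author's own statement) =====
-- stated objective: alternative
-- what changed: A's nested scans (for each element of the shorter list, rescan the longer list from the front and pop the first match) are replaced by building a dict counter of the shorter list once and a single ordered pass over the longer list that consumes counted occurrences; B also does not mutate its arguments.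
import Mathlib
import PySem

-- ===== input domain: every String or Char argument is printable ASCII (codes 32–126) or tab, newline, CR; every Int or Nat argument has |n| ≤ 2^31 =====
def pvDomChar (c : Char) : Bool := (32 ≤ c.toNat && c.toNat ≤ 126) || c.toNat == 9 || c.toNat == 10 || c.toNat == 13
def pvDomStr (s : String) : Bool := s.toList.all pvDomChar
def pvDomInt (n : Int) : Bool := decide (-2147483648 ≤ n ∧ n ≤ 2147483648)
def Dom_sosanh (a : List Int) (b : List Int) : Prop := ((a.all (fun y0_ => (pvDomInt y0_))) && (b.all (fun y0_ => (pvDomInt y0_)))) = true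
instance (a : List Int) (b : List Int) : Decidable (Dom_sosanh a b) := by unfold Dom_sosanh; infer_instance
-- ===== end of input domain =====

-- B replaces A's nested rescans-with-pop with a counter of the shorter list and one
-- ordered pass over the longer list (objective: alternative). A mutates both argument
-- lists in place; B does not — the equivalence proved here is about the RETURN value only.

-- ===== PORT A =====
-- inner while loop of A: scan a from the front for v; on the first match pop it
-- (Python then sets ta past the end, exiting the scan); none = no match found.
def sosanhScan (v : Int) (a : List Int) : Option (List Int) :=
  match a with
  | [] => none
  | x :: rest => if v = x then some rest else (sosanhScan v rest).map (x :: ·)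

-- outer while loop of A: for each element of the shorter list in order (pop at tb, or
-- advance tb, visits each element exactly once), remove its first occurrence from the
-- longer list if present; return what remains of the longer list.
def sosanhOuter (a : List Int) (b : List Int) : List Int :=
  match b with
  | [] => a
  | y :: bs =>
    match sosanhScan y a with
    | some a' => sosanhOuter a' bs
    | none => sosanhOuter a bs

def sosanh (a : List Int) (b : List Int) : List Int :=
  if a.length > b.length then sosanhOuter a b
  else if a.length < b.length then sosanhOuter b a
  else []

-- ===== PORT B =====
-- need[x] = need.get(x, 0) + 1 over the shorter list
def sosanhCounter (shorter : List Int) : PySem.Dict Int Int :=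
  shorter.foldl (fun d x => d.insert x (d.getD x 0 + 1)) PySem.Dict.empty

-- single pass over the longer list: consume a needed occurrence or keep the element
def sosanhFilter (need : PySem.Dict Int Int) (longer : List Int) : List Int :=
  (longer.foldl
    (fun (st : PySem.Dict Int Int × List Int) x =>
      if st.1.getD x 0 > 0 then (st.1.insert x (st.1.getD x 0 - 1), st.2)
      else (st.1, st.2 ++ [x]))
    (need, [])).2

def sosanh_alt (a : List Int) (b : List Int) : List Int :=
  if a.length = b.length then []
  else
    let p := if a.length > b.length then (a, b) else (b, a)
    sosanhFilter (sosanhCounter p.2) p.1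

-- ===== PRECONDITION & SPEC =====
def Spec_sosanh (a : List Int) (b : List Int) (out : List Int) : Prop := out = sosanh_alt a b
instance (a : List Int) (b : List Int) (out : List Int) : Decidable (Spec_sosanh a b out) := by unfold Spec_sosanh; infer_instance

-- ===== CLAIM (what is proved, stated in full; the proofs are below) =====
def Claim_equal_sosanh : Prop := ∀ (a : List Int) (b : List Int), Dom_sosanh a b → Spec_sosanh a b (sosanh a b)

-- ===== LEMMAS AND PROOFS =====

lemma sosanhScan_eq (v : Int) (a : List Int) :
    sosanhScan v a = if v ∈ a then some (a.erase v) else none := by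
  induction a with
  | nil => simp [sosanhScan]
  | cons x rest ih =>
    by_cases hvx : v = x
    · subst hvx; simp [sosanhScan, List.erase_cons_head]
    · have hxv : (x == v) = false := by simp [Ne.symm hvx]
      simp [sosanhScan, hvx, ih, hxv]

lemma sosanhOuter_eq_diff (b a : List Int) : sosanhOuter a b = a.diff b := by
  induction b generalizing a with
  | nil => simp [sosanhOuter]
  | cons y bs ih =>
    rw [List.diff_cons]
    by_cases hy : y ∈ a
    · simp [sosanhOuter, sosanhScan_eq, hy, ih]
    · simp [sosanhOuter, sosanhScan_eq, hy, ih, List.erase_of_not_mem hy]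

lemma sosanhCounter_getD (s : List Int) (x : Int) :
    (sosanhCounter s).getD x 0 = (s.count x : Int) := by
  unfold sosanhCounter
  rw [PySem.Dict.foldl_insert_getD_add_one_eq_counter, PySem.Dict.getD_counter]

lemma sosanhFilter_loop (a : List Int) :
    ∀ (b : List Int) (d : PySem.Dict Int Int) (out : List Int),
      (∀ x, d.getD x 0 = (b.count x : Int)) →
      (a.foldl
        (fun (st : PySem.Dict Int Int × List Int) x =>
          if st.1.getD x 0 > 0 then (st.1.insert x (st.1.getD x 0 - 1), st.2)
          else (st.1, st.2 ++ [x]))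
        (d, out)).2 = out ++ a.diff b := by
  induction a with
  | nil => intro b d out _; simp [List.nil_diff]
  | cons x rest ih =>
    intro b d out h
    by_cases hx : x ∈ b
    · have hc : 0 < b.count x := List.count_pos_iff.mpr hx
      have hgt : d.getD x 0 > 0 := by rw [h x]; exact_mod_cast hc
      have hinv : ∀ y, (d.insert x (d.getD x 0 - 1)).getD y 0 = ((b.erase x).count y : Int) := by
        intro y
        rw [PySem.Dict.getD_insert]
        by_cases hyx : y = x
        · subst hyx
          rw [if_pos rfl, h, List.count_erase_self]
          omega
        · rw [if_neg hyx, h y, List.count_erase_of_ne hyx]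
      simp only [List.foldl_cons, hgt, if_pos]
      rw [ih (b.erase x) _ out hinv, List.cons_diff_of_mem hx]
    · have hz : d.getD x 0 = 0 := by rw [h x]; simp [List.count_eq_zero_of_not_mem hx]
      simp only [List.foldl_cons, hz]
      rw [if_neg (by omega), ih b d (out ++ [x]) h, List.cons_diff_of_not_mem hx,
        List.append_assoc]
      simp

lemma sosanhFilter_eq_diff (long short : List Int) :
    sosanhFilter (sosanhCounter short) long = long.diff short := by
  unfold sosanhFilter
  rw [sosanhFilter_loop long short _ [] (fun x => sosanhCounter_getD short x)]
  simp

-- ===== VERDICT (by name: the statement is the Claim_ definition above) =====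
theorem sosanh_spec : Claim_equal_sosanh := by
  intro a b _
  unfold Spec_sosanh sosanh sosanh_alt
  rcases lt_trichotomy a.length b.length with h | h | h
  · simp only [if_pos h, if_neg (by omega : ¬ a.length = b.length),
      if_neg (by omega : ¬ a.length > b.length)]
    exact (sosanhOuter_eq_diff a b).trans (sosanhFilter_eq_diff b a).symm
  · simp [h]
  · simp only [if_neg (by omega : ¬ a.length = b.length), if_pos h]
    exact (sosanhOuter_eq_diff b a).trans (sosanhFilter_eq_diff a b).symm
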